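-- pv_equiv track=rewrite | github.com/AlienWu2019/Alien-s-Code | oj系统刷题/排队买票.py | f
-- ===== SOURCE A (Python) =====
-- def f(a,b):
--     sum=0
--     if(b==0):
--         sum=1
--     elif(a<b):
--         sum=0
--     else:
--         sum=f(a-1,b)+f(a,b-1)
--     return sum
-- ===== SOURCE B (Python) =====
-- def f(a, b):
--     if b == 0:
--         return 1
--     if a < b:
--         return 0
--     c = 1
--     for i in range(1, b + 1):
--         c = c * (a + i) // i
--     return c - c * b // (a + 1)
-- ===== Notes on version B (the rewrite author's own statement) =====
-- stated objective: alternative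
-- what changed: replaced the exponential double recursion f(a-1,b)+f(a,b-1) by the closed-form ballot number C(a+b,b)-C(a+b,b-1), computed with one multiplicative loop of b exact-division steps
import Mathlib
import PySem

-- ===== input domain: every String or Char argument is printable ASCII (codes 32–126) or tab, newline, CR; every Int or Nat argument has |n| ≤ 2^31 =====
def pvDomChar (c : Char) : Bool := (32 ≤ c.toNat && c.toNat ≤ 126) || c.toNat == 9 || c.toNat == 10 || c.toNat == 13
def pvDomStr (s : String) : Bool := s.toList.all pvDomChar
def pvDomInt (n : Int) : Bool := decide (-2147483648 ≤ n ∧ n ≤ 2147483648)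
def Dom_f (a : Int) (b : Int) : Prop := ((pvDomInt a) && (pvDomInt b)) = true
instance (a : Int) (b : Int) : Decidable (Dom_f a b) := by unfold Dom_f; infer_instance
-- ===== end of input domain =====

-- B replaces A's double recursion by the closed-form ballot number
-- C(a+b,b) - C(a+b,b-1), computed with one multiplicative loop (objective: alternative).

-- ===== PORT A =====
-- A's recursion diverges (RecursionError) for b < 0 ∧ a ≥ b; the fuel argument only
-- makes the same recursion total in Lean (enough fuel is supplied wherever A returns).
def fRec : Nat → Int → Int → Int
  | 0, _, _ => 0
  | fuel + 1, a, b =>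
    if b = 0 then 1
    else if a < b then 0
    else fRec fuel (a - 1) b + fRec fuel a (b - 1)

def f (a : Int) (b : Int) : Int := fRec ((a + b).toNat + 1) a b

-- ===== PORT B =====
def f_alt (a : Int) (b : Int) : Int :=
  if b = 0 then 1
  else if a < b then 0
  else
    let c := (PySem.List.pyRange 1 (b + 1) 1).foldl
      (fun c i => PySem.Int.floordiv (c * (a + i)) i) 1
    c - PySem.Int.floordiv (c * b) (a + 1)

-- ===== PRECONDITION & SPEC =====
-- Pre_ excludes exactly the inputs with b < 0 and a ≥ b, on which A's recursion never
-- terminates (Python raises RecursionError); A returns on every admitted input.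
def Pre_f (a : Int) (b : Int) : Prop := 0 ≤ b ∨ a < b
instance (a : Int) (b : Int) : Decidable (Pre_f a b) := by unfold Pre_f; infer_instance
def pvWitness_f : Int × Int := (4, 2)

def Spec_f (a : Int) (b : Int) (out : Int) : Prop := out = f_alt a b
instance (a : Int) (b : Int) (out : Int) : Decidable (Spec_f a b out) := by unfold Spec_f; infer_instance

-- ===== CLAIM (what is proved, stated in full; the proofs are below) =====
def Claim_equal_f : Prop := ∀ (a : Int) (b : Int), Dom_f a b → Pre_f a b → Spec_f a b (f a b)

-- ===== LEMMAS AND PROOFS =====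

-- closed form as a Nat-indexed function, used as the common reference point
def gNat (n m : Nat) : Int :=
  if m = 0 then 1
  else if n < m then 0
  else ((n + m).choose m : Int) - ((n + m).choose (m - 1) : Int)

-- the multiplicative loop computes the binomial coefficient C(a+m, m)
lemma loop_choose (a : Int) (ha : 0 ≤ a) : ∀ m : Nat,
    (PySem.List.pyRange 1 ((m : Int) + 1) 1).foldl
      (fun c i => PySem.Int.floordiv (c * (a + i)) i) 1
    = ((a.toNat + m).choose m : Int) := by
  intro m
  induction m with
  | zero => simp [PySem.List.pyRange_one_eq_nil]
  | succ m ih =>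
    push_cast
    rw [PySem.List.pyRange_one_succ_right (by omega), List.foldl_append]
    push_cast at ih
    rw [ih]
    simp only [List.foldl_cons, List.foldl_nil]
    have hkey : ((a.toNat + m).choose m : Int) * (a + ((m : Int) + 1))
        = ((a.toNat + (m + 1)).choose (m + 1) : Int) * ((m : Int) + 1) := by
      have h := Nat.add_one_mul_choose_eq (a.toNat + m) m
      -- (a.toNat + m + 1) * choose (a.toNat+m) m = choose (a.toNat+m+1) (m+1) * (m+1)
      have : ((a.toNat + m + 1) * (a.toNat + m).choose m : Int)
          = ((a.toNat + m + 1).choose (m + 1) * (m + 1) : Int) := by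
        exact_mod_cast congrArg (Nat.cast : Nat → Int) h
      have ha' : a = (a.toNat : Int) := by omega
      rw [show a.toNat + (m + 1) = a.toNat + m + 1 from rfl]
      push_cast at this ⊢
      rw [← ha'] at this; linarith [this]
    push_cast at hkey ⊢
    rw [hkey, PySem.Int.floordiv_eq_ediv_of_pos (by positivity),
      Int.mul_ediv_cancel _ (by positivity)]

-- bridge: port B equals the closed form on Nat inputs
lemma f_alt_cast (n m : Nat) : f_alt (n : Int) (m : Int) = gNat n m := by
  by_cases h0 : m = 0
  · simp [f_alt, gNat, h0]
  · by_cases h1 : n < m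
    · simp [f_alt, gNat, h0, h1]
    · have hm0' : ¬((m : Int) = 0) := by exact_mod_cast h0
      have h1' : ¬((n : Int) < (m : Int)) := by exact_mod_cast h1
      simp only [f_alt, gNat, if_neg hm0', if_neg h0, if_neg h1', if_neg h1]
      rw [loop_choose (n : Int) (by positivity) m, Int.toNat_natCast]
      congr 1
      -- floordiv (C(n+m,m) * m) (n+1) = C(n+m, m-1)
      obtain ⟨k, rfl⟩ : ∃ k, m = k + 1 := ⟨m - 1, by omega⟩
      have h := Nat.choose_succ_right_eq (n + (k + 1)) k
      have hsub : n + (k + 1) - k = n + 1 := by omega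
      rw [hsub] at h
      have hcast : ((n + (k + 1)).choose (k + 1) : Int) * ((k + 1 : Nat) : Int)
          = ((n + (k + 1)).choose k : Int) * ((n : Int) + 1) := by
        push_cast
        exact_mod_cast congrArg (Nat.cast : Nat → Int) h
      rw [hcast, PySem.Int.floordiv_eq_ediv_of_pos (by positivity),
        Int.mul_ediv_cancel _ (by positivity)]
      simp

-- Pascal-style recurrence for the closed form
lemma key_nat (n m : Nat) (hm : 1 ≤ m) (hn : m ≤ n) :
    gNat (n - 1) m + gNat n (m - 1) = gNat n m := by
  rcases Nat.lt_or_ge m 2 with h2 | h2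
  · -- m = 1
    have hm1 : m = 1 := by omega
    subst hm1
    rcases Nat.lt_or_ge n 2 with hn2 | hn2
    · have : n = 1 := by omega
      subst this; decide
    · obtain ⟨j, rfl⟩ : ∃ j, n = j + 2 := ⟨n - 2, by omega⟩
      simp only [gNat]
      norm_num [Nat.choose_one_right]
      ring
  · -- m ≥ 2
    obtain ⟨k, rfl⟩ : ∃ k, m = k + 2 := ⟨m - 2, by omega⟩
    rcases Nat.eq_or_lt_of_le hn with heq | hlt
    · -- n = m
      subst heq
      simp only [gNat]
      rw [if_neg (by omega), if_pos (by omega), if_neg (by omega), if_neg (by omega),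
        if_neg (by omega), if_neg (by omega)]
      rw [show k + 2 - 1 = k + 1 by omega, show k + 1 - 1 = k by omega,
        show k + 2 + (k + 1) = 2 * k + 3 by omega,
        show k + 2 + (k + 2) = 2 * k + 4 by omega]
      have p1 : (2 * k + 4).choose (k + 2) = (2 * k + 3).choose (k + 1) + (2 * k + 3).choose (k + 2) := by
        rw [show 2 * k + 4 = (2 * k + 3) + 1 by omega]
        exact Nat.choose_succ_succ _ _
      have p2 : (2 * k + 4).choose (k + 1) = (2 * k + 3).choose k + (2 * k + 3).choose (k + 1) := by
        rw [show 2 * k + 4 = (2 * k + 3) + 1 by omega]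
        exact Nat.choose_succ_succ _ _
      have psymm : (2 * k + 3).choose (k + 2) = (2 * k + 3).choose (k + 1) := by
        have h := Nat.choose_symm (n := 2 * k + 3) (k := k + 2) (by omega)
        rw [show 2 * k + 3 - (k + 2) = k + 1 by omega] at h
        exact h.symm
      rw [p1, p2, psymm]
      push_cast
      ring
    · -- n ≥ m + 1
      obtain ⟨j, rfl⟩ : ∃ j, n = k + j + 3 := ⟨n - (k + 3), by omega⟩
      simp only [gNat]
      rw [if_neg (by omega), if_neg (by omega), if_neg (by omega), if_neg (by omega),
        if_neg (by omega), if_neg (by omega)]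
      rw [show k + 2 - 1 = k + 1 by omega, show k + 1 - 1 = k by omega,
        show k + j + 3 - 1 = k + j + 2 by omega,
        show k + j + 2 + (k + 2) = 2 * k + j + 4 by omega,
        show k + j + 3 + (k + 1) = 2 * k + j + 4 by omega,
        show k + j + 3 + (k + 2) = 2 * k + j + 5 by omega]
      have p1 : (2 * k + j + 5).choose (k + 2)
          = (2 * k + j + 4).choose (k + 1) + (2 * k + j + 4).choose (k + 2) := by
        rw [show 2 * k + j + 5 = (2 * k + j + 4) + 1 by omega]
        exact Nat.choose_succ_succ _ _
      have p2 : (2 * k + j + 5).choose (k + 1)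
          = (2 * k + j + 4).choose k + (2 * k + j + 4).choose (k + 1) := by
        rw [show 2 * k + j + 5 = (2 * k + j + 4) + 1 by omega]
        exact Nat.choose_succ_succ _ _
      rw [p1, p2]
      push_cast
      ring

-- Int version of the recurrence, phrased on port B
lemma key_int (a b : Int) (hb : 1 ≤ b) (hab : b ≤ a) :
    f_alt (a - 1) b + f_alt a (b - 1) = f_alt a b := by
  obtain ⟨n, rfl⟩ : ∃ n : Nat, a = (n : Int) := ⟨a.toNat, by omega⟩
  obtain ⟨m, rfl⟩ : ∃ m : Nat, b = (m : Int) := ⟨b.toNat, by omega⟩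
  have hn1 : 1 ≤ n := by exact_mod_cast hb.trans hab
  have hm1 : 1 ≤ m := by exact_mod_cast hb
  have hmn : m ≤ n := by exact_mod_cast hab
  rw [show ((n : Int) - 1) = ((n - 1 : Nat) : Int) by omega,
    show ((m : Int) - 1) = ((m - 1 : Nat) : Int) by omega,
    f_alt_cast, f_alt_cast, f_alt_cast]
  exact key_nat n m hm1 hmn

-- the fueled recursion of port A equals port B when the fuel is sufficient
lemma fRec_eq (fuel : Nat) : ∀ (a b : Int), 0 ≤ b → (a + b).toNat < fuel →
    fRec fuel a b = f_alt a b := by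
  induction fuel with
  | zero => intro a b _ h; omega
  | succ fuel ih =>
    intro a b hb hf
    simp only [fRec]
    by_cases h0 : b = 0
    · simp [f_alt, h0]
    · by_cases h1 : a < b
      · simp [f_alt, h0, h1]
      · rw [if_neg h0, if_neg h1,
          ih (a - 1) b hb (by omega), ih a (b - 1) (by omega) (by omega)]
        exact key_int a b (by omega) (by omega)

-- ===== VERDICT (by name: the statement is the Claim_ definition above) =====
theorem f_spec : Claim_equal_f := by
  intro a b _ hpre
  unfold Spec_f f
  rcases hpre with hb | hab
  · exact fRec_eq _ a b hb (by omega)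
  · by_cases h0 : b = 0
    · simp [fRec, f_alt, h0]
    · simp [fRec, f_alt, h0, hab]
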